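-- pv_equiv track=rewrite | github.com/ssrahn/KBSMosaic | generator/mosaicGenerator.py | get_smallest_unsatisfied_number
-- ===== SOURCE A (Python) =====
-- def get_smallest_unsatisfied_number(satisfaction):
--     # Coordinates of smallest unsatisfied number
--     x = -1
--     y = -1
--     # Iterators
--     _x = 0
--     _y = 0
--     # Value of smallest unsatisfied number
--     value = 10
--     for row in satisfaction:
--         _y = 0
--         for col in row:
--             # Check if not yet satisfied
--             if col > 0:
--                 # Check if value is smaller than previous smallest value
--                 if col < value:
--                     # Remember coordinates
--                     x = _x
--                     y = _y
--
--                     # Break immediatly, if value is 1 (it cannot be smaller)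
--                     if col == 1:
--                         return [x,y]
--                     # Else save value
--                     value = col
--
--             _y += 1
--         _x += 1
--     return [x,y]
-- ===== SOURCE B (Python) =====
-- def get_smallest_unsatisfied_number(satisfaction):
--     cands = [(col, i, j)
--              for i, row in enumerate(satisfaction)
--              for j, col in enumerate(row)
--              if 0 < col < 10]
--     if not cands:
--         return [-1, -1]
--     best = min(cands)
--     return [best[1], best[2]]
-- ===== Notes on version B (the rewrite author's own statement) =====
-- stated objective: simpler
-- what changed: Replaces the nested mutable-state scan with its early return by building the filtered candidate list (value, row, col) once and taking min with tuple ordering, which reproduces the <10 cap, the row-major first-occurrence tie-break and the [-1,-1] empty case.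
import Mathlib
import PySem

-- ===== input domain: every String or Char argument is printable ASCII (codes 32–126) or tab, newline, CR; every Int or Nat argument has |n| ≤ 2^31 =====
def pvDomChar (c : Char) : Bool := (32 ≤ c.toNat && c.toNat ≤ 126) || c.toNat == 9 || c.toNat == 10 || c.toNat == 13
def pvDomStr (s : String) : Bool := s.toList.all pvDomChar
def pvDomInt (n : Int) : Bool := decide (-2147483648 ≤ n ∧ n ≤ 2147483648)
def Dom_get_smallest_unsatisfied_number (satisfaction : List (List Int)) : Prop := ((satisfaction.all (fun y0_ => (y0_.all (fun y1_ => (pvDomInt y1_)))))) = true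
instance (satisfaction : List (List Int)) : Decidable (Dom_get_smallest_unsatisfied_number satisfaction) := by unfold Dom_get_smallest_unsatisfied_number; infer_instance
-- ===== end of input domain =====

-- B builds the candidate list once and takes min (simpler decomposition); A is a hand-rolled
-- nested scan with mutable best-so-far state and an early return on value 1. Same return values.

-- ===== PORT A =====
-- inner loop of A over one row: state (x, y, value), iterators (_x, _y);
-- .inl = the early `return [x,y]` when col == 1, .inr = state at end of row
def aCols (ix iy x y value : Int) : List Int → (List Int) ⊕ (Int × Int × Int)
  | [] => .inr (x, y, value)
  | c :: rest =>
    if 0 < c then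
      if c < value then
        if c = 1 then .inl [ix, iy]
        else aCols ix (iy + 1) ix iy c rest
      else aCols ix (iy + 1) x y value rest
    else aCols ix (iy + 1) x y value rest

-- outer loop of A over the rows
def aRows (ix x y value : Int) : List (List Int) → List Int
  | [] => [x, y]
  | row :: rest =>
    match aCols ix 0 x y value row with
    | .inl res => res
    | .inr (x', y', v') => aRows (ix + 1) x' y' v' rest

def get_smallest_unsatisfied_number (satisfaction : List (List Int)) : List Int :=
  aRows 0 (-1) (-1) 10 satisfaction

-- ===== PORT B =====
-- Python tuple comparison (c, i, j) < (c', i', j') : lexicographic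
def lexLt (a b : Int × Int × Int) : Bool :=
  decide (a.1 < b.1 ∨ (a.1 = b.1 ∧ (a.2.1 < b.2.1 ∨ (a.2.1 = b.2.1 ∧ a.2.2 < b.2.2))))

-- the comprehension: candidates (col, i, j) with 0 < col < 10, row-major order
def bCands (satisfaction : List (List Int)) : List (Int × Int × Int) :=
  (PySem.List.enumerate satisfaction).flatMap (fun p =>
    (PySem.List.enumerate p.2).filterMap (fun q =>
      if 0 < q.2 ∧ q.2 < 10 then some (q.2, p.1, q.1) else none))

def get_smallest_unsatisfied_number_alt (satisfaction : List (List Int)) : List Int :=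
  match bCands satisfaction with
  | [] => [-1, -1]
  | h :: t =>
    -- min(cands): Python's min keeps the first minimal element
    let best := t.foldl (fun m c => if lexLt c m then c else m) h
    [best.2.1, best.2.2]

-- ===== PRECONDITION & SPEC =====
def Spec_get_smallest_unsatisfied_number (satisfaction : List (List Int)) (out : List Int) : Prop := out = get_smallest_unsatisfied_number_alt satisfaction
instance (satisfaction : List (List Int)) (out : List Int) : Decidable (Spec_get_smallest_unsatisfied_number satisfaction out) := by unfold Spec_get_smallest_unsatisfied_number; infer_instance

-- ===== CLAIM (what is proved, stated in full; the proofs are below) =====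
def Claim_equal_get_smallest_unsatisfied_number : Prop := ∀ (satisfaction : List (List Int)), Dom_get_smallest_unsatisfied_number satisfaction → Spec_get_smallest_unsatisfied_number satisfaction (get_smallest_unsatisfied_number satisfaction)

-- ===== LEMMAS AND PROOFS =====

-- position order: (x, y) strictly before (i, j) in row-major order
def posLt (x y i j : Int) : Prop := x < i ∨ (x = i ∧ y < j)

-- B's fold step
def bStep (m c : Int × Int × Int) : Int × Int × Int := if lexLt c m then c else m

-- candidates of one row starting at column index jy (generalisation of the inner comprehension)
def cRow (ix jy : Int) (row : List Int) : List (Int × Int × Int) :=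
  (PySem.List.enumerate row jy).filterMap (fun q =>
    if 0 < q.2 ∧ q.2 < 10 then some (q.2, ix, q.1) else none)

-- candidates of all rows starting at row index ix
def cRows (ix : Int) (rows : List (List Int)) : List (Int × Int × Int) :=
  (PySem.List.enumerate rows ix).flatMap (fun p => cRow p.1 0 p.2)

theorem cRow_cons (ix jy c : Int) (rest : List Int) :
    cRow ix jy (c :: rest) =
      (if 0 < c ∧ c < 10 then [(c, ix, jy)] else []) ++ cRow ix (jy + 1) rest := by
  by_cases h : 0 < c ∧ c < 10 <;> simp [cRow, PySem.List.enumerate_cons, h]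

theorem cRows_cons' (ix : Int) (r : List Int) (rest : List (List Int)) :
    cRows ix (r :: rest) = cRow ix 0 r ++ cRows (ix + 1) rest := by
  simp [cRows, PySem.List.enumerate_cons]

theorem bCands_eq (s : List (List Int)) : bCands s = cRows 0 s := by
  simp [bCands, cRows, cRow]

-- every candidate's value is strictly between 0 and 10, and its position is ≥ the start indices
theorem mem_cRow (ix jy : Int) (row : List Int) (t : Int × Int × Int)
    (h : t ∈ cRow ix jy row) : 0 < t.1 ∧ t.1 < 10 ∧ t.2.1 = ix ∧ jy ≤ t.2.2 := by
  induction row generalizing jy with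
  | nil => simp [cRow] at h
  | cons c rest ih =>
    rw [cRow_cons] at h
    rcases List.mem_append.mp h with h | h
    · split_ifs at h with hc
      · simp at h; subst h; exact ⟨hc.1, hc.2, rfl, le_refl _⟩
      · simp at h
    · have := ih (jy + 1) h; omega

theorem mem_cRows (ix : Int) (rows : List (List Int)) (t : Int × Int × Int)
    (h : t ∈ cRows ix rows) : 0 < t.1 ∧ t.1 < 10 ∧ ix ≤ t.2.1 := by
  induction rows generalizing ix with
  | nil => simp [cRows] at h
  | cons r rest ih =>
    rw [cRows_cons'] at h
    rcases List.mem_append.mp h with h | h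
    · have := mem_cRow ix 0 r t h; omega
    · have := ih (ix + 1) h; omega

-- if no element of l beats acc, the fold stays at acc
theorem foldl_bStep_stay (l : List (Int × Int × Int)) (acc : Int × Int × Int)
    (h : ∀ c ∈ l, lexLt c acc = false) : l.foldl bStep acc = acc := by
  induction l with
  | nil => rfl
  | cons c rest ih =>
    have hc := h c (List.mem_cons_self ..)
    rw [List.foldl_cons, show bStep acc c = acc by simp [bStep, hc]]
    exact ih (fun d hd => h d (List.mem_cons_of_mem _ hd))

-- after reaching value 1 at position (a, b), nothing later (strictly greater position,
-- value ≥ 1) beats it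
theorem foldl_bStep_one (l : List (Int × Int × Int)) (a b : Int)
    (h : ∀ c ∈ l, 1 ≤ c.1 ∧ posLt a b c.2.1 c.2.2) :
    l.foldl bStep (1, a, b) = (1, a, b) := by
  apply foldl_bStep_stay
  intro c hc
  have := h c hc
  simp only [lexLt, decide_eq_false_iff_not, posLt] at *
  omega

-- inner-loop invariant: with 1 < value ≤ 10 and (x, y) strictly before (ix, iy),
-- aCols either ends the row with a state equal to folding the row's candidates,
-- or early-returns [a, b] with the fold pinned at (1, a, b)
theorem aCols_fold (row : List Int) (ix iy x y value : Int)
    (hv1 : 1 < value) (hv10 : value ≤ 10) (hpos : posLt x y ix iy) :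
    (∃ x' y' v', aCols ix iy x y value row = .inr (x', y', v') ∧
       (cRow ix iy row).foldl bStep (value, x, y) = (v', x', y') ∧
       1 < v' ∧ v' ≤ value ∧ (x' = x ∧ y' = y ∨ x' = ix)) ∨
    (∃ b, aCols ix iy x y value row = .inl [ix, b] ∧
       (cRow ix iy row).foldl bStep (value, x, y) = (1, ix, b) ∧ iy ≤ b) := by
  induction row generalizing iy x y value with
  | nil =>
    left
    exact ⟨x, y, value, rfl, rfl, hv1, le_refl _, Or.inl ⟨rfl, rfl⟩⟩
  | cons c rest ih =>
    rw [cRow_cons]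
    by_cases hc0 : 0 < c
    · by_cases hcv : c < value
      · by_cases hc1 : c = 1
        · -- early return; candidate (c, ix, iy) is in the list and pins the fold at 1
          subst hc1
          right
          refine ⟨iy, ?_, ?_, le_refl _⟩
          · simp [aCols, hc0, hcv]
          · rw [if_pos (⟨hc0, by omega⟩ : (0:Int) < 1 ∧ (1:Int) < 10)]
            simp only [List.cons_append, List.nil_append, List.foldl_cons]
            have hlt : lexLt (1, ix, iy) (value, x, y) = true := by
              simp only [lexLt, decide_eq_true_iff]; left; omega
            rw [show bStep (value, x, y) (1, ix, iy) = (1, ix, iy) by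
              simp [bStep, hlt]]
            apply foldl_bStep_one
            intro t ht
            have := mem_cRow ix (iy + 1) rest t ht
            exact ⟨by omega, by unfold posLt; omega⟩
        · -- update state to (ix, iy, c)
          have h' := ih (iy + 1) ix iy c (by omega) (by omega) (by unfold posLt; omega)
          have hin : (0 < c ∧ c < 10) := ⟨hc0, by omega⟩
          have hlt : lexLt (c, ix, iy) (value, x, y) = true := by
            simp only [lexLt, decide_eq_true_iff]; left; omega
          have hstep : bStep (value, x, y) (c, ix, iy) = (c, ix, iy) := by
            simp [bStep, hlt]
          rcases h' with ⟨x', y', v', he, hf, h1, h2, h3⟩ | ⟨b, he, hf, hb⟩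
          · left
            refine ⟨x', y', v', ?_, ?_, h1, by omega, ?_⟩
            · simp [aCols, hc0, hcv, hc1]; exact he
            · rw [if_pos hin]; simpa [hstep] using hf
            · rcases h3 with ⟨h3, _⟩ | h3 <;> simp [h3]
          · right
            refine ⟨b, ?_, ?_, by omega⟩
            · simp [aCols, hc0, hcv, hc1]; exact he
            · rw [if_pos hin]; simpa [hstep] using hf
      · -- c ≥ value: no update; candidate may or may not be in cRow, but never beats acc
        have hstep : bStep (value, x, y) (c, ix, iy) = (value, x, y) := by
          have hl : lexLt (c, ix, iy) (value, x, y) = false := by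
            simp only [lexLt, decide_eq_false_iff_not]
            rcases hpos with h | h
            · omega
            · omega
          simp [bStep, hl]
        have h' := ih (iy + 1) x y value hv1 hv10 (by unfold posLt at hpos ⊢; omega)
        rcases h' with ⟨x', y', v', he, hf, h1, h2, h3⟩ | ⟨b, he, hf, hb⟩
        · left
          refine ⟨x', y', v', ?_, ?_, h1, h2, h3⟩
          · simp [aCols, hc0, hcv]; exact he
          · split_ifs with hin
            · simpa [hstep] using hf
            · simpa using hf
        · right
          refine ⟨b, ?_, ?_, by omega⟩
          · simp [aCols, hc0, hcv]; exact he
          · split_ifs with hin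
            · simpa [hstep] using hf
            · simpa using hf
    · -- c ≤ 0: skipped by both
      have h' := ih (iy + 1) x y value hv1 hv10 (by unfold posLt at hpos ⊢; omega)
      rw [if_neg (by omega), List.nil_append]
      rcases h' with ⟨x', y', v', he, hf, h1, h2, h3⟩ | ⟨b, he, hf, hb⟩
      · exact Or.inl ⟨x', y', v', by simp [aCols, hc0]; exact he, hf, h1, h2, h3⟩
      · exact Or.inr ⟨b, by simp [aCols, hc0]; exact he, hf, by omega⟩

-- outer-loop invariant
theorem aRows_fold (rows : List (List Int)) (ix x y value : Int)
    (hv1 : 1 < value) (hv10 : value ≤ 10) (hx : x < ix) :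
    aRows ix x y value rows =
      (match (cRows ix rows).foldl bStep (value, x, y) with
       | (_, a, b) => [a, b]) := by
  induction rows generalizing ix x y value with
  | nil => simp [aRows, cRows]
  | cons r rest ih =>
    rw [cRows_cons', List.foldl_append]
    rcases aCols_fold r ix 0 x y value hv1 hv10 (Or.inl hx) with
      ⟨x', y', v', he, hf, h1, h2, h3⟩ | ⟨b, he, hf, hb⟩
    · rw [aRows, he, hf]
      exact ih (ix + 1) x' y' v' h1 (by omega) (by rcases h3 with ⟨h3, _⟩ | h3 <;> omega)
    · rw [aRows, he, hf, foldl_bStep_one]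
      intro t ht
      have := mem_cRows (ix + 1) rest t ht
      exact ⟨by omega, by unfold posLt; omega⟩

-- ===== VERDICT (by name: the statement is the Claim_ definition above) =====
theorem get_smallest_unsatisfied_number_spec : Claim_equal_get_smallest_unsatisfied_number := by
  intro s _
  unfold Spec_get_smallest_unsatisfied_number
  show get_smallest_unsatisfied_number s = _
  rw [get_smallest_unsatisfied_number, aRows_fold s 0 (-1) (-1) 10 (by omega) (le_refl _) (by omega)]
  rw [get_smallest_unsatisfied_number_alt]
  rw [bCands_eq] at *
  cases hc : cRows 0 s with
  | nil => simp
  | cons h t =>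
    have hlt : lexLt h (10, -1, -1) = true := by
      have := mem_cRows 0 s h (hc ▸ List.mem_cons_self ..)
      simp only [lexLt, decide_eq_true_iff]; left; omega
    simp only [List.foldl_cons]
    rw [show bStep (10, -1, -1) h = h by simp [bStep, hlt]]
    rfl
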